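-- pv_equiv track=rewrite | github.com/WojtekMs/Miscellaneous | update_readme.py | get_updated_readme
-- ===== SOURCE A (Python) =====
-- def is_header(text: str) -> bool:
--     return text.startswith("### ")
--
-- def parse_header(text: str) -> str:
--     id = text.find("[")
--     if id != -1:
--         return text[id+1:text.rfind("]")]
--     return text[4:-1]
--
-- def make_header(text: str) -> str:
--     return f"### [{text}]({text})\n"
--
-- def get_updated_readme(old_readme: "list[str]", new_examples: "list[str]") -> "list[str]":
--     output = []
--     new_examples = sorted(new_examples)
--     for line in old_readme:
--         if is_header(line):
--             header = parse_header(line)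
--             while len(new_examples) != 0 and new_examples[0] < header:
--                 output.append(make_header(new_examples[0]))
--                 del new_examples[0]
--         output.append(line)
--     for example in new_examples:
--         output.append(make_header(example))
--     return output
-- ===== SOURCE B (Python) =====
-- def is_header(text: str) -> bool:
--     return text.startswith("### ")
--
-- def parse_header(text: str) -> str:
--     id = text.find("[")
--     if id != -1:
--         return text[id+1:text.rfind("]")]
--     return text[4:-1]
--
-- def make_header(text: str) -> str:
--     return f"### [{text}]({text})\n"
--
-- def get_updated_readme(old_readme: "list[str]", new_examples: "list[str]") -> "list[str]":
--     # Bucket strategy: an example is inserted before the FIRST original header whose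
--     # value exceeds it, and only prefix-maximum headers can ever be that first one.
--     # Build that staircase once, sweep a single pointer over it for the sorted
--     # examples, collect buckets keyed by line index, then emit old_readme in one walk.
--     headers = [(i, parse_header(line)) for i, line in enumerate(old_readme) if is_header(line)]
--     recs = []
--     mx = None
--     for i, h in headers:
--         if mx is None or mx < h:
--             recs.append((i, h))
--             mx = h
--     n = len(old_readme)
--     buckets = {}
--     r = 0
--     for e in sorted(new_examples):
--         while r < len(recs) and recs[r][1] <= e:
--             r += 1
--         slot = recs[r][0] if r < len(recs) else n
--         buckets.setdefault(slot, []).append(make_header(e))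
--     out = []
--     for i, line in enumerate(old_readme):
--         if i in buckets:
--             out.extend(buckets[i])
--         out.append(line)
--     out.extend(buckets.get(n, []))
--     return out
-- ===== Notes on version B (the rewrite author's own statement) =====
-- stated objective: alternative
-- what changed: Replaces A's single merge pass that repeatedly pops the front of the sorted example list at each header with a bucket scheme: collect the prefix-maximum original headers (the only possible insertion points), sweep one pointer over that staircase for the sorted examples to bucket the generated lines by target line index in a dict, then emit old_readme in one walk interleaving the buckets.
import Mathlib
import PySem

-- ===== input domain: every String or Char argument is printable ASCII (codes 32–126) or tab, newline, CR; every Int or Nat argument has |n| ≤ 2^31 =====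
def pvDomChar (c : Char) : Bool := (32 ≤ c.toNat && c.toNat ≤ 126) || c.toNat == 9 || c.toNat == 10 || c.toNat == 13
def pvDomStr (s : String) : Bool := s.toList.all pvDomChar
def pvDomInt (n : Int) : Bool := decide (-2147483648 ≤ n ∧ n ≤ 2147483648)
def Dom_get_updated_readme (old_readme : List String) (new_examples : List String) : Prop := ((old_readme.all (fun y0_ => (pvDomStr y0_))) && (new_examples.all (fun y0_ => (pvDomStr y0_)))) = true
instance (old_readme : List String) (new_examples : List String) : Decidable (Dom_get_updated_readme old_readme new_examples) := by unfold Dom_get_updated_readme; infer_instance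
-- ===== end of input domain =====

-- B replaces A's front-popping merge pass by a bucket scheme: it keeps only the
-- prefix-maximum headers (the only possible insertion points), sweeps one pointer over
-- them for the sorted examples to bucket the generated lines by line index, and then
-- emits old_readme in a single walk.

-- ===== PORT A =====
-- shared module helpers (used verbatim by both Pythons)
def pvIsHeader (text : String) : Bool := PySem.Str.startswith text "### "

def pvParseHeader (text : String) : String :=
  let id := PySem.Str.find text "["
  if id ≠ -1 then
    PySem.Str.slice text (some (id + 1)) (some (PySem.Str.rfind text "]"))
  else
    PySem.Str.slice text (some 4) (some (-1))

def pvMakeHeader (text : String) : String := "### [" ++ text ++ "](" ++ text ++ ")\n"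

-- A's inner `while len(new_examples) != 0 and new_examples[0] < header: append; del [0]`
def pvPopLoop (output : List String) (ex : List String) (header : String) : List String × List String :=
  match ex with
  | [] => (output, [])
  | e :: rest =>
      if e < header then pvPopLoop (output ++ [pvMakeHeader e]) rest header
      else (output, e :: rest)

def get_updated_readme (old_readme : List String) (new_examples : List String) : List String :=
  let output : List String := []
  let ex := PySem.List.sorted new_examples (fun x => x) false
  let st := old_readme.foldl
    (fun (st : List String × List String) line =>
      let st := if pvIsHeader line then pvPopLoop st.1 st.2 (pvParseHeader line) else st
      (st.1 ++ [line], st.2))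
    (output, ex)
  st.2.foldl (fun out e => out ++ [pvMakeHeader e]) st.1

-- ===== PORT B =====
-- B's inner `while r < len(recs) and recs[r][1] <= e: r += 1`
def pvAdvance (recs : List (Int × String)) (e : String) (r : Nat) : Nat :=
  if h : r < recs.length then
    if (recs[r]'h).2 ≤ e then pvAdvance recs e (r + 1) else r
  else r
termination_by recs.length - r
decreasing_by omega

def get_updated_readme_alt (old_readme : List String) (new_examples : List String) : List String :=
  let headers := ((PySem.List.enumerate old_readme 0).filter (fun p => pvIsHeader p.2)).map
    (fun p => (p.1, pvParseHeader p.2))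
  -- `recs`/`mx` loop: keep the prefix-maximum headers
  let recs := (headers.foldl
    (fun (st : List (Int × String) × Option String) p =>
      if (match st.2 with | none => true | some v => decide (v < p.2)) then (st.1 ++ [p], some p.2)
      else st)
    ([], none)).1
  let n := PySem.List.len old_readme
  -- bucket loop; `buckets.setdefault(slot, []).append(x)` is PySem.Dict.modify slot [] (· ++ [x])
  let st := (PySem.List.sorted new_examples (fun x => x) false).foldl
    (fun (st : Nat × PySem.Dict Int (List String)) e =>
      let r := pvAdvance recs e st.1
      let slot : Int := if h : r < recs.length then (recs[r]'h).1 else n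
      (r, st.2.modify slot [] (fun l => l ++ [pvMakeHeader e])))
    (0, PySem.Dict.empty)
  let buckets := st.2
  -- emit walk; `if i in buckets: out.extend(buckets[i])` (lookup exact under the contains guard)
  let out := (PySem.List.enumerate old_readme 0).foldl
    (fun (out : List String) p =>
      let out := if buckets.contains p.1 then out ++ buckets.getD p.1 [] else out
      out ++ [p.2])
    []
  out ++ buckets.getD n []

-- ===== PRECONDITION & SPEC =====
def Spec_get_updated_readme (old_readme : List String) (new_examples : List String) (out : List String) : Prop := out = get_updated_readme_alt old_readme new_examples
instance (old_readme : List String) (new_examples : List String) (out : List String) : Decidable (Spec_get_updated_readme old_readme new_examples out) := by unfold Spec_get_updated_readme; infer_instance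

-- ===== CLAIM (what is proved, stated in full; the proofs are below) =====
def Claim_equal_get_updated_readme : Prop := ∀ (old_readme : List String) (new_examples : List String), Dom_get_updated_readme old_readme new_examples → Spec_get_updated_readme old_readme new_examples (get_updated_readme old_readme new_examples)

-- ===== LEMMAS AND PROOFS =====

-- common reference function: merge `ex` (assumed sorted) into `lines`
def pvGo : List String → List String → List String
  | [], ex => ex.map pvMakeHeader
  | line :: rest, ex =>
      if pvIsHeader line then
        ((ex.takeWhile (fun e => decide (e < pvParseHeader line))).map pvMakeHeader)
          ++ line :: pvGo rest (ex.dropWhile (fun e => decide (e < pvParseHeader line)))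
      else line :: pvGo rest ex

-- ---------- A = pvGo ----------

lemma pvPopLoop_eq (ex : List String) : ∀ (out : List String) (h : String),
    pvPopLoop out ex h =
      (out ++ (ex.takeWhile (fun e => decide (e < h))).map pvMakeHeader,
       ex.dropWhile (fun e => decide (e < h))) := by
  induction ex with
  | nil => intro out h; simp [pvPopLoop]
  | cons e rest ih =>
      intro out h
      rw [List.takeWhile_cons, List.dropWhile_cons]
      simp only [pvPopLoop]
      by_cases he : e < h
      · rw [decide_eq_true he, if_pos he, ih]
        simp only [if_true, List.map_cons, List.append_assoc, List.cons_append, List.nil_append]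
      · rw [decide_eq_false he, if_neg he]
        simp only [Bool.false_eq_true, if_false, List.map_nil, List.append_nil]

lemma pvA_fold (lines : List String) : ∀ (out ex : List String),
    ((lines.foldl
        (fun (st : List String × List String) line =>
          ((if pvIsHeader line then pvPopLoop st.1 st.2 (pvParseHeader line) else st).1 ++ [line],
           (if pvIsHeader line then pvPopLoop st.1 st.2 (pvParseHeader line) else st).2))
        (out, ex)).2).foldl (fun o e => o ++ [pvMakeHeader e])
      ((lines.foldl
        (fun (st : List String × List String) line =>
          ((if pvIsHeader line then pvPopLoop st.1 st.2 (pvParseHeader line) else st).1 ++ [line],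
           (if pvIsHeader line then pvPopLoop st.1 st.2 (pvParseHeader line) else st).2))
        (out, ex)).1) = out ++ pvGo lines ex := by
  induction lines with
  | nil =>
      intro out ex
      simp only [List.foldl_nil]
      rw [PySem.List.foldl_append_singleton_eq_map]
      simp [pvGo]
  | cons line rest ih =>
      intro out ex
      rw [List.foldl_cons]
      by_cases hh : pvIsHeader line
      · simp only [if_pos hh]
        rw [pvPopLoop_eq]
        rw [ih]
        simp only [pvGo, if_pos hh, List.append_assoc, List.cons_append, List.nil_append]
      · simp only [if_neg hh]
        rw [ih]
        simp only [pvGo, if_neg hh, List.append_assoc, List.cons_append, List.nil_append]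

lemma pvA_eq_go (old_readme new_examples : List String) :
    get_updated_readme old_readme new_examples
      = pvGo old_readme (PySem.List.sorted new_examples (fun x => x) false) := by
  have := pvA_fold old_readme [] (PySem.List.sorted new_examples (fun x => x) false)
  simpa [get_updated_readme] using this

-- ---------- B = pvGo ----------

def pvHeaders (old : List String) : List (Int × String) :=
  ((PySem.List.enumerate old 0).filter (fun p => pvIsHeader p.2)).map (fun p => (p.1, pvParseHeader p.2))

-- headers computed from a suffix of `old` starting at absolute index s
def pvHeadersFrom (lines : List String) (s : Int) : List (Int × String) :=
  ((PySem.List.enumerate lines s).filter (fun p => pvIsHeader p.2)).map (fun p => (p.1, pvParseHeader p.2))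

-- first original header index whose value exceeds e (else n) — the merge invariant's measure
def pvTarget (headers : List (Int × String)) (n : Int) (e : String) : Int :=
  match headers with
  | [] => n
  | (i, h) :: rest => if e < h then i else pvTarget rest n e

lemma pvTarget_append (A B : List (Int × String)) (n : Int) (e : String) :
    pvTarget (A ++ B) n e = pvTarget A (pvTarget B n e) e := by
  induction A with
  | nil => simp [pvTarget]
  | cons p rest ih => cases p with | mk i h => by_cases he : e < h <;> simp [pvTarget, he, ih]

lemma pvTarget_mem (A : List (Int × String)) (n : Int) (e : String) :
    pvTarget A n e = n ∨ pvTarget A n e ∈ A.map Prod.fst := by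
  induction A with
  | nil => simp [pvTarget]
  | cons p rest ih =>
      cases p with | mk i h =>
      by_cases he : e < h
      · simp [pvTarget, he]
      · rcases ih with h1 | h1 <;> simp [pvTarget, he, h1]

lemma pvMem_enumerate_fst {α : Type} {xs : List α} {s : Int} {p : Int × α}
    (hp : p ∈ PySem.List.enumerate xs s) : s ≤ p.1 ∧ p.1 < s + xs.length := by
  have : p.1 ∈ (PySem.List.enumerate xs s).map (fun x => x.1) := List.mem_map_of_mem hp
  rw [PySem.List.map_fst_enumerate] at this
  exact PySem.List.mem_pyRange_one.mp this

lemma pvHeadersFrom_fst_lb {lines : List String} {s i : Int}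
    (hi : i ∈ (pvHeadersFrom lines s).map Prod.fst) : s ≤ i := by
  simp only [pvHeadersFrom, List.map_map, List.mem_map, List.mem_filter] at hi
  obtain ⟨p, ⟨hp, _⟩, hfst⟩ := hi
  have := (pvMem_enumerate_fst hp).1
  simpa [← hfst] using this

lemma pvHeadersFrom_fst_ub {lines : List String} {s i : Int}
    (hi : i ∈ (pvHeadersFrom lines s).map Prod.fst) : i < s + lines.length := by
  simp only [pvHeadersFrom, List.map_map, List.mem_map, List.mem_filter] at hi
  obtain ⟨p, ⟨hp, _⟩, hfst⟩ := hi
  have := (pvMem_enumerate_fst hp).2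
  simpa [← hfst] using this

-- split the full header table at absolute index k
lemma pvHeaders_split (old : List String) (k : Nat) (hk : k ≤ old.length) :
    pvHeaders old = pvHeadersFrom (old.take k) 0 ++ pvHeadersFrom (old.drop k) k := by
  have h2 : ((old.take k).length : Int) = (k : Int) := by
    simp [List.length_take, Nat.min_eq_left hk]
  have h3 : pvHeadersFrom (old.take k ++ old.drop k) 0
      = pvHeadersFrom (old.take k) 0 ++ pvHeadersFrom (old.drop k) k := by
    unfold pvHeadersFrom
    rw [PySem.List.enumerate_append, zero_add, h2, List.filter_append, List.map_append]
  calc pvHeaders old = pvHeadersFrom (old.take k ++ old.drop k) 0 := by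
        unfold pvHeaders pvHeadersFrom
        rw [List.take_append_drop]
    _ = pvHeadersFrom (old.take k) 0 ++ pvHeadersFrom (old.drop k) k := h3

-- B's emit loop as a flatMap
lemma pvEmit_foldl {α : Type} (g : α → List String) (h : α → String) (l : List α) :
    ∀ (init : List String),
    l.foldl (fun out p => (out ++ g p) ++ [h p]) init = init ++ l.flatMap (fun p => g p ++ [h p]) := by
  induction l with
  | nil => intro init; simp
  | cons p rest ih => intro init; simp [List.flatMap_def]

-- on a ≤-sorted list a downward-closed test filters a prefix
lemma pvSorted_filter_takeWhile (p : String → Bool)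
    (hdc : ∀ a b : String, a ≤ b → p b = true → p a = true) :
    ∀ (l : List String), l.Pairwise (· ≤ ·) →
      l.filter p = l.takeWhile p ∧ ∀ e ∈ l.dropWhile p, p e = false := by
  intro l hl
  induction l with
  | nil => simp
  | cons x rest ih =>
      rcases List.pairwise_cons.mp hl with ⟨hx, hrest⟩
      by_cases hpx : p x = true
      · obtain ⟨h1, h2⟩ := ih hrest
        refine ⟨by simp [hpx, h1], ?_⟩
        simpa [List.dropWhile_cons, hpx] using h2
      · have hrest0 : ∀ e ∈ rest, p e = false := by
          intro e he
          by_contra hcon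
          have : p e = true := by revert hcon; cases p e <;> simp
          exact hpx (hdc x e (hx e he) this)
        constructor
        · have : rest.filter p = [] := List.filter_eq_nil_iff.mpr (by
            intro e he
            simp [hrest0 e he])
          simp [hpx, this]
        · intro e he
          simp only [List.dropWhile_cons, hpx] at he
          simp only [Bool.false_eq_true, if_neg, not_false_iff] at he
          rcases List.mem_cons.mp he with rfl | he
          · simpa using hpx
          · exact hrest0 e he

-- main invariant: emitting the suffix `old.drop k` against examples `rem`
-- (all targeted at index ≥ k) produces pvGo of that suffix
lemma pvB_main (old : List String) : ∀ (m k : Nat) (rem : List String),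
    old.length - k = m → k ≤ old.length →
    rem.Pairwise (· ≤ ·) →
    (∀ e ∈ rem, (k : Int) ≤ pvTarget (pvHeaders old) (old.length : Int) e) →
    (PySem.List.enumerate (old.drop k) (k : Int)).flatMap
        (fun p => ((rem.filter (fun e => pvTarget (pvHeaders old) (old.length : Int) e == p.1)).map pvMakeHeader) ++ [p.2])
      ++ (rem.filter (fun e => pvTarget (pvHeaders old) (old.length : Int) e == (old.length : Int))).map pvMakeHeader
      = pvGo (old.drop k) rem := by
  intro m
  induction m with
  | zero =>
      intro k rem hm hk hsorted hge
      have hkl : k = old.length := by omega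
      subst hkl
      have hdrop : old.drop old.length = ([] : List String) := by simp
      rw [hdrop]
      have hall : ∀ e ∈ rem, (pvTarget (pvHeaders old) (old.length : Int) e == (old.length : Int)) = true := by
        intro e he
        have hle : pvTarget (pvHeaders old) (old.length : Int) e ≤ (old.length : Int) := by
          rcases pvTarget_mem (pvHeaders old) (old.length : Int) e with h1 | h1
          · omega
          · have := pvHeadersFrom_fst_ub (lines := old) (s := 0) (i := pvTarget (pvHeaders old) (old.length : Int) e) (by simpa [pvHeaders, pvHeadersFrom] using h1)
            omega
        have := hge e he
        simp only [beq_iff_eq]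
        omega
      rw [List.filter_eq_self.mpr hall]
      simp [pvGo]
  | succ m ih =>
      intro k rem hm hk hsorted hge
      have hklt : k < old.length := by omega
      have hdrop : old.drop k = old[k] :: old.drop (k + 1) := List.drop_eq_getElem_cons hklt
      set x := old[k] with hx
      -- decompose the header table at k
      have hsplit := pvHeaders_split old k (Nat.le_of_lt hklt)
      rw [hdrop] at hsplit
      have hpre_lt : ∀ i ∈ (pvHeadersFrom (old.take k) 0).map Prod.fst, i < (k : Int) := by
        intro i hi
        have := pvHeadersFrom_fst_ub hi
        have hlen : ((old.take k).length : Int) = (k : Int) := by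
          simp [List.length_take, Nat.min_eq_left (Nat.le_of_lt hklt)]
        omega
      -- for rem-elements the pre-headers never fire
      have htail_ge : ∀ i ∈ (pvHeadersFrom (old.drop (k+1)) (k+1)).map Prod.fst, ((k : Int) + 1) ≤ i := by
        intro i hi
        have := pvHeadersFrom_fst_lb hi
        omega
      have hsuf : ∀ e ∈ rem, pvTarget (pvHeaders old) (old.length : Int) e
          = pvTarget (pvHeadersFrom (x :: old.drop (k+1)) k) (old.length : Int) e := by
        intro e he
        rw [hsplit, pvTarget_append]
        rcases pvTarget_mem (pvHeadersFrom (old.take k) 0)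
            (pvTarget (pvHeadersFrom (x :: old.drop (k+1)) k) (old.length : Int) e) e with h1 | h1
        · exact h1
        · exfalso
          have hlt := hpre_lt _ h1
          have := hge e he
          rw [hsplit, pvTarget_append] at this
          omega
      by_cases hh : pvIsHeader x
      · -- header line
        set hp := pvParseHeader x with hhp
        have hsufc : pvHeadersFrom (x :: old.drop (k+1)) k
            = ((k : Int), hp) :: pvHeadersFrom (old.drop (k+1)) (k+1) := by
          simp [pvHeadersFrom, PySem.List.enumerate_cons, hh, hhp]
        -- target characterisation on rem
        have hchar : ∀ e ∈ rem, (e < hp → pvTarget (pvHeaders old) (old.length : Int) e = (k : Int))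
            ∧ (¬ e < hp → (k : Int) + 1 ≤ pvTarget (pvHeaders old) (old.length : Int) e) := by
          intro e he
          rw [hsuf e he, hsufc]
          constructor
          · intro hlt; simp [pvTarget, hlt]
          · intro hnlt
            simp only [pvTarget, if_neg hnlt]
            rcases pvTarget_mem (pvHeadersFrom (old.drop (k+1)) (k+1)) (old.length : Int) e with h1 | h1
            · omega
            · exact htail_ge _ h1
        obtain ⟨hfilter, hdropw⟩ := pvSorted_filter_takeWhile (fun e => decide (e < hp))
          (by intro a b hab hb
              simp only [decide_eq_true_eq] at *
              exact lt_of_le_of_lt hab hb) rem hsorted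
        -- bucket at k = takeWhile (< hp)
        have hbk : rem.filter (fun e => pvTarget (pvHeaders old) (old.length : Int) e == (k : Int))
            = rem.takeWhile (fun e => decide (e < hp)) := by
          rw [← hfilter]
          apply List.filter_congr
          intro e he
          obtain ⟨h1, h2⟩ := hchar e he
          by_cases hlt : e < hp
          · simp [hlt, h1 hlt]
          · have h3 := h2 hlt
            have hne : pvTarget (pvHeaders old) (old.length : Int) e ≠ (k : Int) := by omega
            simp [hne, hlt]
        set rem' := rem.dropWhile (fun e => decide (e < hp)) with hrem'
        have hremsplit : rem = rem.takeWhile (fun e => decide (e < hp)) ++ rem' := by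
          rw [hrem']; exact (List.takeWhile_append_dropWhile).symm
        have hrem'_mem : ∀ e ∈ rem', e ∈ rem := by
          intro e he; rw [hremsplit]; exact List.mem_append_right _ he
        have hrem'_ge : ∀ e ∈ rem', ((k : Int) + 1) ≤ pvTarget (pvHeaders old) (old.length : Int) e := by
          intro e he
          have he' : e ∈ rem.dropWhile (fun e => decide (e < hp)) := by
            rw [← hrem']; exact he
          have hfalse := hdropw e he' 
          have : ¬ e < hp := by simpa using hfalse
          exact (hchar e (hrem'_mem e he)).2 this
        -- every later bucket key exceeds k, so the takeWhile-part never contributes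
        have hbucket_eq : ∀ i : Int, (k : Int) < i →
            rem.filter (fun e => pvTarget (pvHeaders old) (old.length : Int) e == i)
            = rem'.filter (fun e => pvTarget (pvHeaders old) (old.length : Int) e == i) := by
          intro i hki
          rw [hremsplit, List.filter_append]
          have hnil : (rem.takeWhile (fun e => decide (e < hp))).filter
              (fun e => pvTarget (pvHeaders old) (old.length : Int) e == i) = [] := by
            apply List.filter_eq_nil_iff.mpr
            intro e he
            have hmem : e ∈ rem := by rw [hremsplit]; exact List.mem_append_left _ he
            have hlt : e < hp := by
              have := List.mem_takeWhile_imp he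
              simpa using this
            have := (hchar e hmem).1 hlt
            simp only [beq_iff_eq]
            omega
          rw [hnil]; rfl
        -- evaluate one step of the flatMap
        rw [hdrop, PySem.List.enumerate_cons, List.flatMap_cons]
        have hstep : (PySem.List.enumerate (old.drop (k+1)) ((k : Int) + 1)).flatMap
              (fun p => ((rem.filter (fun e => pvTarget (pvHeaders old) (old.length : Int) e == p.1)).map pvMakeHeader) ++ [p.2])
            = (PySem.List.enumerate (old.drop (k+1)) ((k : Int) + 1)).flatMap
              (fun p => ((rem'.filter (fun e => pvTarget (pvHeaders old) (old.length : Int) e == p.1)).map pvMakeHeader) ++ [p.2]) := by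
          apply List.flatMap_congr
          intro p hpmem
          have := (pvMem_enumerate_fst hpmem).1
          rw [hbucket_eq p.1 (by omega)]
        have hend : rem.filter (fun e => pvTarget (pvHeaders old) (old.length : Int) e == (old.length : Int))
            = rem'.filter (fun e => pvTarget (pvHeaders old) (old.length : Int) e == (old.length : Int)) := by
          exact hbucket_eq _ (by exact_mod_cast hklt)
        have hcast : ((k : Int) + 1) = ((k + 1 : Nat) : Int) := by push_cast; ring
        have hih := ih (k+1) rem' (by omega) (by omega)
          (List.Pairwise.sublist (List.dropWhile_sublist _) hsorted)
          (by intro e he; rw [← hcast]; exact hrem'_ge e he)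
        rw [hbk, hstep, hend, List.append_assoc, hcast, hih]
        simp [pvGo, hh, hhp, hrem']
      · -- non-header line: bucket at k is empty
        have hsufc : pvHeadersFrom (x :: old.drop (k+1)) k = pvHeadersFrom (old.drop (k+1)) (k+1) := by
          simp [pvHeadersFrom, PySem.List.enumerate_cons, hh]
        have hge' : ∀ e ∈ rem, ((k : Int) + 1) ≤ pvTarget (pvHeaders old) (old.length : Int) e := by
          intro e he
          rw [hsuf e he, hsufc]
          rcases pvTarget_mem (pvHeadersFrom (old.drop (k+1)) (k+1)) (old.length : Int) e with h1 | h1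
          · omega
          · exact htail_ge _ h1
        have hbk : rem.filter (fun e => pvTarget (pvHeaders old) (old.length : Int) e == (k : Int)) = [] := by
          apply List.filter_eq_nil_iff.mpr
          intro e he
          have := hge' e he
          simp only [beq_iff_eq]
          omega
        rw [hdrop, PySem.List.enumerate_cons, List.flatMap_cons]
        have hcast : ((k : Int) + 1) = ((k + 1 : Nat) : Int) := by push_cast; ring
        have hih := ih (k+1) rem (by omega) (by omega) hsorted
          (by intro e he; rw [← hcast]; exact hge' e he)
        rw [hbk, List.append_assoc, hcast, hih]
        simp [pvGo, hh]

-- cons-style form of B's prefix-maximum (`recs`) loop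
def pvRecs : List (Int × String) → Option String → List (Int × String)
  | [], _ => []
  | p :: t, mx =>
      if (match mx with | none => true | some v => decide (v < p.2)) then p :: pvRecs t (some p.2)
      else pvRecs t mx

lemma pvRecsLoop_eq (hs : List (Int × String)) : ∀ (acc : List (Int × String)) (mx : Option String),
    (hs.foldl
      (fun (st : List (Int × String) × Option String) p =>
        if (match st.2 with | none => true | some v => decide (v < p.2)) then (st.1 ++ [p], some p.2)
        else st)
      (acc, mx)).1 = acc ++ pvRecs hs mx := by
  induction hs with
  | nil => intro acc mx; simp [pvRecs]
  | cons p t ih =>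
      intro acc mx
      simp only [List.foldl_cons]
      by_cases hc : (match mx with | none => true | some v => decide (v < p.2)) = true
      · rw [if_pos hc, ih]
        simp only [pvRecs]
        rw [if_pos hc, List.append_assoc, List.singleton_append]
      · rw [if_neg hc, ih]
        simp only [pvRecs]
        rw [if_neg hc]

-- the staircase answers first-exceeding queries exactly like the full header list
lemma pvTarget_recs (n : Int) (e : String) : ∀ (hs : List (Int × String)) (mx : Option String),
    (match mx with | none => True | some v => ¬ e < v) →
    pvTarget (pvRecs hs mx) n e = pvTarget hs n e := by
  intro hs
  induction hs with
  | nil => intro mx _; simp [pvRecs]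
  | cons p t ih =>
      obtain ⟨i, h⟩ := p
      intro mx hmx
      cases mx with
      | none =>
          simp only [pvRecs]
          rw [if_pos trivial]
          by_cases he : e < h
          · simp only [pvTarget]
            rw [if_pos he, if_pos he]
          · simp only [pvTarget]
            rw [if_neg he, if_neg he]
            exact ih (some h) he
      | some v =>
          have hev : ¬ e < v := hmx
          by_cases hvp : v < h
          · simp only [pvRecs]
            rw [if_pos (decide_eq_true hvp)]
            by_cases he : e < h
            · simp only [pvTarget]
              rw [if_pos he, if_pos he]
            · simp only [pvTarget]
              rw [if_neg he, if_neg he]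
              exact ih (some h) he
          · simp only [pvRecs]
            rw [if_neg (by simpa using hvp)]
            have hne : ¬ e < h := by
              intro hlt
              exact hvp (lt_of_le_of_lt (le_of_not_gt hev) hlt)
            rw [ih (some v) hev]
            simp only [pvTarget]
            rw [if_neg hne]

lemma pvAdvance_eq (recs : List (Int × String)) (e : String) :
    ∀ (m r : Nat), recs.length - r ≤ m →
    pvAdvance recs e r = r + ((recs.drop r).takeWhile (fun p => decide (p.2 ≤ e))).length := by
  intro m
  induction m with
  | zero =>
      intro r hr
      have hge : recs.length ≤ r := by omega
      rw [pvAdvance, dif_neg (by omega)]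
      simp [List.drop_eq_nil_of_le hge]
  | succ m ih =>
      intro r hr
      by_cases hlt : r < recs.length
      · have hdrop : recs.drop r = recs[r] :: recs.drop (r + 1) := List.drop_eq_getElem_cons hlt
        by_cases hle : recs[r].2 ≤ e
        · rw [pvAdvance, dif_pos hlt, if_pos hle, ih (r + 1) (by omega), hdrop]
          rw [List.takeWhile_cons, decide_eq_true hle]
          simp only [if_true, List.length_cons]
          omega
        · rw [pvAdvance, dif_pos hlt, if_neg hle, hdrop]
          rw [List.takeWhile_cons, decide_eq_false hle]
          simp
      · rw [pvAdvance, dif_neg (by omega)]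
        simp [List.drop_eq_nil_of_le (by omega : recs.length ≤ r)]

lemma pvHead_dropWhile {α : Type} (p : α → Bool) :
    ∀ (l : List α) (x : α) (t : List α), l.dropWhile p = x :: t → p x = false := by
  intro l
  induction l with
  | nil => simp [List.dropWhile]
  | cons a l ih =>
      intro x t h
      by_cases hp : p a
      · rw [List.dropWhile_cons_of_pos hp] at h; exact ih x t h
      · rw [List.dropWhile_cons_of_neg hp] at h
        cases h; simpa using hp

lemma pvTarget_skip (e : String) :
    ∀ (A : List (Int × String)) (d : Int), (∀ p ∈ A, ¬ e < p.2) → pvTarget A d e = d := by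
  intro A
  induction A with
  | nil => intro d _; simp [pvTarget]
  | cons p t ih =>
      intro d h
      have hp := h p (by simp)
      simp only [pvTarget, if_neg hp]
      exact ih d (fun q hq => h q (by simp [hq]))

-- pointer state r, with everything before it at value ≤ e, answers pvTarget recs n e
lemma pvSlot_eq (recs : List (Int × String)) (n : Int) (e : String) (r : Nat)
    (hinv : ∀ p ∈ recs.take r, p.2 ≤ e) :
    (if h : pvAdvance recs e r < recs.length then (recs[pvAdvance recs e r]'h).1 else n)
      = pvTarget recs n e := by
  have hadv := pvAdvance_eq recs e recs.length r (by omega)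
  set t := (recs.drop r).takeWhile (fun p => decide (p.2 ≤ e)) with ht
  set rem := (recs.drop r).dropWhile (fun p => decide (p.2 ≤ e)) with hrem
  have hsplit : recs.drop r = t ++ rem := by
    rw [ht, hrem, List.takeWhile_append_dropWhile]
  have hdrop' : recs.drop (pvAdvance recs e r) = rem := by
    rw [hadv, ← List.drop_drop, hsplit, List.drop_left]
  have htgt : pvTarget recs n e = pvTarget rem n e := by
    conv_lhs => rw [← List.take_append_drop r recs]
    rw [pvTarget_append, pvTarget_skip e (recs.take r) _
      (fun p hp => not_lt.mpr (hinv p hp)), hsplit, pvTarget_append,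
      pvTarget_skip e t _ (by
        intro p hp
        rw [ht] at hp
        have := List.mem_takeWhile_imp hp
        simp only [decide_eq_true_eq] at this
        exact not_lt.mpr this)]
  rw [htgt]
  cases hrm : rem with
  | nil =>
      have hge : recs.length ≤ pvAdvance recs e r := by
        rw [← List.drop_eq_nil_iff, hdrop', hrm]
      rw [dif_neg (by omega)]
      simp [pvTarget]
  | cons p tl =>
      have hlt : pvAdvance recs e r < recs.length := by
        by_contra hge
        have : recs.drop (pvAdvance recs e r) = [] := List.drop_eq_nil_of_le (by omega)
        rw [hdrop', hrm] at this
        cases this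
      have hget : recs[pvAdvance recs e r]'hlt = p := by
        have h1 : recs[pvAdvance recs e r]? = some p := by
          rw [← List.head?_drop, hdrop', hrm]
          rfl
        rw [List.getElem?_eq_getElem hlt] at h1
        exact Option.some.inj h1
      have hnle : (decide (p.2 ≤ e)) = false := by
        apply pvHead_dropWhile (fun p => decide (p.2 ≤ e)) (recs.drop r) p tl
        rw [← hrem, hrm]
      have hlt2 : e < p.2 := by
        simp only [decide_eq_false_iff_not] at hnle
        exact lt_of_not_ge hnle
      rw [dif_pos hlt, hget]
      simp [pvTarget, hlt2]

-- B's bucket loop builds exactly the modify-fold over (target, header-line) pairs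
lemma pvBuckets_eq (recs : List (Int × String)) (n : Int) :
    ∀ (ex : List String) (r : Nat) (d : PySem.Dict Int (List String)),
    ex.Pairwise (· ≤ ·) →
    (∀ p ∈ recs.take r, ∀ e ∈ ex, p.2 ≤ e) →
    (ex.foldl
      (fun (st : Nat × PySem.Dict Int (List String)) e =>
        (pvAdvance recs e st.1,
         st.2.modify (if h : pvAdvance recs e st.1 < recs.length
            then (recs[pvAdvance recs e st.1]'h).1 else n) [] (fun l => l ++ [pvMakeHeader e])))
      (r, d)).2
    = (ex.map (fun e => (pvTarget recs n e, pvMakeHeader e))).foldl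
        (fun d q => d.modify q.1 [] (fun l => l ++ [q.2])) d := by
  intro ex
  induction ex with
  | nil => intro r d _ _; simp
  | cons e ex' ih =>
      intro r d hp hinv
      rcases List.pairwise_cons.mp hp with ⟨he, hp'⟩
      rw [List.foldl_cons, List.map_cons, List.foldl_cons]
      have hslot := pvSlot_eq recs n e r (fun p hpm => hinv p hpm e (by simp))
      rw [hslot]
      apply ih (pvAdvance recs e r) _ hp'
      -- the advanced prefix still lies at value ≤ every remaining example
      intro p hpm e' he'
      have hadv := pvAdvance_eq recs e recs.length r (by omega)
      rw [hadv, List.take_add] at hpm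
      rcases List.mem_append.mp hpm with hpre | hseg
      · exact hinv p hpre e' (by simp [he'])
      · have hsub : p ∈ (recs.drop r).takeWhile (fun p => decide (p.2 ≤ e)) := by
          have hpref : ((recs.drop r).takeWhile (fun p => decide (p.2 ≤ e))) ++
              ((recs.drop r).dropWhile (fun p => decide (p.2 ≤ e))) = recs.drop r := by
            rw [List.takeWhile_append_dropWhile]
          have := List.take_left (l₁ := (recs.drop r).takeWhile (fun p => decide (p.2 ≤ e)))
            (l₂ := (recs.drop r).dropWhile (fun p => decide (p.2 ≤ e)))
          rw [hpref] at this
          rw [← this]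
          exact hseg
        have hle : p.2 ≤ e := by
          have := List.mem_takeWhile_imp hsub
          simpa using this
        exact le_trans hle (he e' he')

lemma pvB_eq_go (old_readme new_examples : List String) :
    get_updated_readme_alt old_readme new_examples
      = pvGo old_readme (PySem.List.sorted new_examples (fun x => x) false) := by
  set ex := PySem.List.sorted new_examples (fun x => x) false with hex
  have hsorted : ex.Pairwise (· ≤ ·) := by
    have := PySem.List.sorted_pairwise new_examples (fun x => x)
    simpa [hex] using this
  set n : Int := (old_readme.length : Int) with hn
  set recs := pvRecs (pvHeaders old_readme) none with hrecs
  have hrecs_fold : ((pvHeaders old_readme).foldl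
      (fun (st : List (Int × String) × Option String) p =>
        if (match st.2 with | none => true | some v => decide (v < p.2)) then (st.1 ++ [p], some p.2)
        else st)
      ([], none)).1 = recs := by
    rw [pvRecsLoop_eq, List.nil_append, hrecs]
  have htr : ∀ e, pvTarget recs n e = pvTarget (pvHeaders old_readme) n e := by
    intro e
    rw [hrecs]
    exact pvTarget_recs n e (pvHeaders old_readme) none trivial
  have hbuck := pvBuckets_eq recs n ex 0 PySem.Dict.empty hsorted (by simp)
  have hbget : ∀ c : Int,
      ((ex.map (fun e => (pvTarget recs n e, pvMakeHeader e))).foldl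
        (fun d q => d.modify q.1 [] (fun l => l ++ [q.2])) PySem.Dict.empty).getD c []
      = (ex.filter (fun e => pvTarget (pvHeaders old_readme) n e == c)).map pvMakeHeader := by
    intro c
    rw [PySem.Dict.getD_foldl_modify_append, PySem.Dict.getD_empty, List.nil_append,
      List.filter_map, List.map_map]
    congr 1
    apply List.filter_congr
    intro e _
    simp [htr e]
  have hge : ∀ e ∈ ex, ((0 : Nat) : Int) ≤ pvTarget (pvHeaders old_readme) n e := by
    intro e _
    rcases pvTarget_mem (pvHeaders old_readme) n e with h1 | h1
    · rw [h1, hn]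
      omega
    · have := pvHeadersFrom_fst_lb (lines := old_readme) (s := 0)
        (i := pvTarget (pvHeaders old_readme) n e)
        (by simpa [pvHeaders, pvHeadersFrom] using h1)
      simpa using this
  have hmain := pvB_main old_readme old_readme.length 0 ex (by omega) (by omega) hsorted hge
  simp only [List.drop_zero, Nat.cast_zero] at hmain
  unfold get_updated_readme_alt
  simp only [PySem.List.len_eq, ← hex, ← hn]
  rw [show ((PySem.List.enumerate old_readme 0).filter (fun p => pvIsHeader p.2)).map
      (fun p => (p.1, pvParseHeader p.2)) = pvHeaders old_readme from rfl]
  rw [hrecs_fold, hbuck]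
  set buckets := (ex.map (fun e => (pvTarget recs n e, pvMakeHeader e))).foldl
      (fun d q => d.modify q.1 [] (fun l => l ++ [q.2])) PySem.Dict.empty with hbk
  have hemit : (PySem.List.enumerate old_readme 0).foldl
      (fun (out : List String) p =>
        (if buckets.contains p.1 then out ++ buckets.getD p.1 [] else out) ++ [p.2]) []
      = (PySem.List.enumerate old_readme 0).foldl
      (fun (out : List String) p => (out ++ buckets.getD p.1 []) ++ [p.2]) [] := by
    apply PySem.List.foldl_congr_mem
    intro out p _
    by_cases hc : buckets.contains p.1
    · rw [if_pos hc]
    · rw [if_neg hc, PySem.Dict.getD_of_not_contains buckets []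
        (by simpa using hc)]
      simp
  rw [hemit]
  have hflat := pvEmit_foldl (fun p : Int × String => buckets.getD p.1 []) (fun p => p.2)
    (PySem.List.enumerate old_readme 0) []
  simp only [List.nil_append] at hflat
  rw [hflat]
  have hinner : (PySem.List.enumerate old_readme 0).flatMap
      (fun p => buckets.getD p.1 [] ++ [p.2])
      = (PySem.List.enumerate old_readme 0).flatMap
      (fun p => (ex.filter (fun e => pvTarget (pvHeaders old_readme) n e == p.1)).map pvMakeHeader ++ [p.2]) := by
    apply List.flatMap_congr
    intro p _
    rw [hbget]
  rw [hinner, hbget]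
  exact hmain

-- ===== VERDICT (by name: the statement is the Claim_ definition above) =====
theorem get_updated_readme_spec : Claim_equal_get_updated_readme := by
  intro old_readme new_examples _
  unfold Spec_get_updated_readme
  rw [pvA_eq_go, pvB_eq_go]
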